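-- pv_equiv track=rewrite | github.com/ngiengkianyew/daily-coding-problem | solutions/problem_259.py | get_optimal_chars
-- ===== SOURCE A (Python) =====
-- def get_optimal_chars(words):
--     candidates = dict()
--     for word in words:
--         fc = word[0]
--         if fc not in candidates:
--             candidates[fc] = set()
--         candidates[fc].add(len(word))
--
--     opt_chars = set()
--     for char in candidates:
--         if all((not (x % 2)) for x in candidates[char]):
--             opt_chars.add(char)
--
--     return opt_chars
-- ===== SOURCE B (Python) =====
-- def get_optimal_chars(words):
--     # One pass: for each first char keep a single boolean "all lengths so far even",
--     # instead of collecting a set of lengths and rescanning it.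
--     flags = {}
--     for word in words:
--         fc = word[0]
--         flags[fc] = flags.get(fc, True) and len(word) % 2 == 0
--     return {c for c, ok in flags.items() if ok}
-- ===== Notes on version B (the rewrite author's own statement) =====
-- stated objective: simpler
-- what changed: B folds the all-even check into the single traversal, keeping one boolean per first character, instead of A's building a set of word lengths per first character and then rescanning every group with all(); the second pass over groups disappears.
import Mathlib
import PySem

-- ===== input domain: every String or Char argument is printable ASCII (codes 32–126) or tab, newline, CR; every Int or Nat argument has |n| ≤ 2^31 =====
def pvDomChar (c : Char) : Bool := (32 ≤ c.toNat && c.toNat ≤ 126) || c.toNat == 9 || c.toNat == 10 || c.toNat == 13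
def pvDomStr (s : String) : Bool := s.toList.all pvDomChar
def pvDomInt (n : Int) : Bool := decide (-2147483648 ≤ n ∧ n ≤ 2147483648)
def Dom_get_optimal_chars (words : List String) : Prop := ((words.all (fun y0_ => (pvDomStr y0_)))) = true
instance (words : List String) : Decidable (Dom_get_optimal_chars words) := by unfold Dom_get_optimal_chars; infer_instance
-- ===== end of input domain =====

-- B folds the all-even check into the single traversal (one boolean per first char)
-- instead of collecting per-char sets of lengths and rescanning them; objective: simpler.


-- ===== PORT A =====
-- word[0] as a 1-character Python string; the "" branch is only reached outside Pre_ (Python raises IndexError there)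
def pyFirstChar (w : String) : String :=
  match PySem.Str.pyGet? w 0 with
  | some c => String.ofList [c]
  | none => ""

def get_optimal_chars (words : List String) : List String :=
  let candidates : PySem.Dict String (PySem.Set Int) :=
    words.foldl (fun d word =>
      let fc := pyFirstChar word
      let d := if d.contains fc = false then d.insert fc PySem.Set.empty else d
      d.modify fc PySem.Set.empty (fun s => PySem.Set.add s (PySem.Str.len word)))
      PySem.Dict.empty
  candidates.keys.foldl (fun opt char =>
    if (candidates.getD char PySem.Set.empty).all (fun x => PySem.Int.mod x 2 == 0)
    then PySem.Set.add opt char else opt)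
    PySem.Set.empty

-- ===== PORT B =====
def get_optimal_chars_alt (words : List String) : List String :=
  let flags : PySem.Dict String Bool :=
    words.foldl (fun d word =>
      let fc := pyFirstChar word
      d.insert fc (d.getD fc true && (PySem.Int.mod (PySem.Str.len word) 2 == 0)))
      PySem.Dict.empty
  flags.items.foldl (fun s kv => if kv.2 then PySem.Set.add s kv.1 else s) PySem.Set.empty

-- ===== PRECONDITION & SPEC =====
-- Pre_ excludes lists containing an empty string, on which Python A (and B) raises IndexError at word[0].
def Pre_get_optimal_chars (words : List String) : Prop := ∀ w ∈ words, w ≠ ""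
instance (words : List String) : Decidable (Pre_get_optimal_chars words) := by
  unfold Pre_get_optimal_chars; infer_instance
def pvWitness_get_optimal_chars : List String := ["ab", "cde", "af"]

def Spec_get_optimal_chars (words : List String) (out : List String) : Prop := out = get_optimal_chars_alt words
instance (words : List String) (out : List String) : Decidable (Spec_get_optimal_chars words out) := by unfold Spec_get_optimal_chars; infer_instance

-- ===== CLAIM (what is proved, stated in full; the proofs are below) =====
def Claim_equal_get_optimal_chars : Prop := ∀ (words : List String), Dom_get_optimal_chars words → Pre_get_optimal_chars words → Spec_get_optimal_chars words (get_optimal_chars words)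

-- ===== LEMMAS AND PROOFS =====

-- "all lengths in this group are even", the value A's second pass computes per group
def pvVal (s : PySem.Set Int) : Bool := s.all (fun x => PySem.Int.mod x 2 == 0)

-- B's dict is A's dict with every group collapsed to its all-even boolean
def pvMap (d : PySem.Dict String (PySem.Set Int)) : PySem.Dict String Bool :=
  ⟨d.items.map (fun kv => (kv.1, pvVal kv.2))⟩

lemma contains_pvMap (d : PySem.Dict String (PySem.Set Int)) (k : String) :
    (pvMap d).contains k = d.contains k := by
  simp [pvMap, PySem.Dict.contains, List.any_map, Function.comp_def]

lemma get?_pvMap (d : PySem.Dict String (PySem.Set Int)) (k : String) :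
    (pvMap d).get? k = (d.get? k).map pvVal := by
  simp only [pvMap, PySem.Dict.get?, List.find?_map, Function.comp_def]
  cases List.find? (fun p => p.1 == k) d.items <;> simp

lemma pvMap_items (d : PySem.Dict String (PySem.Set Int)) :
    (pvMap d).items = d.items.map (fun kv => (kv.1, pvVal kv.2)) := rfl

lemma insert_items_of_contains {ν : Type} (d : PySem.Dict String ν) (k : String) (v : ν)
    (h : d.contains k = true) :
    (d.insert k v).items = d.items.map (fun p => if p.1 == k then (k, v) else p) := by
  simp only [PySem.Dict.insert, h, if_true]

lemma insert_items_of_not_contains {ν : Type} (d : PySem.Dict String ν) (k : String) (v : ν)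
    (h : d.contains k = false) :
    (d.insert k v).items = d.items ++ [(k, v)] := by
  simp only [PySem.Dict.insert, h, Bool.false_eq_true, if_false]

lemma all_setAdd (s : PySem.Set Int) (x : Int) (p : Int → Bool) :
    (PySem.Set.add s x).all p = (s.all p && p x) := by
  by_cases hx : x ∈ s
  · have hadd : PySem.Set.add s x = s := by
      simp [PySem.Set.add, PySem.Set.contains, hx]
    rw [hadd]
    cases hp : p x
    · have : s.all p = false := List.all_eq_false.mpr ⟨x, hx, by simp [hp]⟩
      simp [this]
    · simp
  · have hadd : PySem.Set.add s x = s ++ [x] := by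
      simp [PySem.Set.add, PySem.Set.contains, hx]
    rw [hadd]; simp

lemma step_eq (d : PySem.Dict String (PySem.Set Int)) (fc : String) (n : Int) :
    (pvMap d).insert fc ((pvMap d).getD fc true && (PySem.Int.mod n 2 == 0))
      = pvMap ((if d.contains fc = false then d.insert fc PySem.Set.empty else d).modify fc
          PySem.Set.empty (fun s => PySem.Set.add s n)) := by
  by_cases hc : d.contains fc = true
  · -- existing key: both sides replace the fc entry in place
    have hnotfalse : ¬ d.contains fc = false := by simp [hc]
    rw [if_neg hnotfalse]
    obtain ⟨v, hv⟩ : ∃ v, d.get? fc = some v := by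
      cases hfind : List.find? (fun p => p.1 == fc) d.items with
      | none =>
          exfalso
          have hall := List.find?_eq_none.mp hfind
          simp only [PySem.Dict.contains, List.any_eq_true] at hc
          obtain ⟨p, hp, hpk⟩ := hc
          exact hall p hp hpk
      | some q => exact ⟨q.2, by simp [PySem.Dict.get?, hfind]⟩
    have hgd : d.getD fc PySem.Set.empty = v := by simp [PySem.Dict.getD, hv]
    have hgb : (pvMap d).getD fc true = pvVal v := by
      simp [PySem.Dict.getD, get?_pvMap, hv]
    have hcB : (pvMap d).contains fc = true := by rw [contains_pvMap]; exact hc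
    rw [PySem.Dict.modify, hgd, hgb]
    apply PySem.Dict.ext
    rw [insert_items_of_contains _ _ _ hcB]
    simp only [pvMap_items]
    rw [insert_items_of_contains _ _ _ hc, List.map_map, List.map_map]
    apply List.map_congr_left
    intro kv _
    by_cases hk : kv.1 = fc
    · simp [hk, pvVal, all_setAdd]
    · simp [hk]
  · -- fresh key: both sides append the new entry
    have hc' : d.contains fc = false := by simpa using hc
    have hnomatch : ∀ p ∈ d.items, (p.1 == fc) = false := by
      intro p hp
      by_contra hne
      have hpk : (p.1 == fc) = true := by simpa using hne
      exact hc (by simp only [PySem.Dict.contains, List.any_eq_true]; exact ⟨p, hp, hpk⟩)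
    rw [if_pos hc']
    have hcB : (pvMap d).contains fc = false := by rw [contains_pvMap]; exact hc'
    have h1 : (d.insert fc PySem.Set.empty).items = d.items ++ [(fc, PySem.Set.empty)] := by
      simp [PySem.Dict.insert, hc']
    have hcont1 : (d.insert fc PySem.Set.empty).contains fc = true := by
      rw [PySem.Dict.contains, h1]; simp
    have hget1 : (d.insert fc PySem.Set.empty).get? fc = some PySem.Set.empty := by
      rw [PySem.Dict.get?, h1, List.find?_append,
        List.find?_eq_none.mpr (fun p hp => by simp [hnomatch p hp])]
      simp
    have hgB : (pvMap d).getD fc true = true := by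
      simp only [PySem.Dict.getD, get?_pvMap]
      rw [PySem.Dict.get?, List.find?_eq_none.mpr (fun p hp => by simp [hnomatch p hp])]
      rfl
    rw [PySem.Dict.modify]
    have hgd1 : (d.insert fc PySem.Set.empty).getD fc PySem.Set.empty = PySem.Set.empty := by
      rw [PySem.Dict.getD, hget1]; rfl
    rw [hgd1, hgB, Bool.true_and]
    apply PySem.Dict.ext
    rw [insert_items_of_not_contains _ _ _ hcB]
    simp only [pvMap_items]
    rw [insert_items_of_contains _ _ _ hcont1, h1, List.map_append, List.map_append,
      List.map_map]
    congr 1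
    · apply List.map_congr_left
      intro kv hkv
      have hne : kv.1 ≠ fc := by simpa using hnomatch kv hkv
      simp [hne]
    · simp [pvVal, PySem.Set.add, PySem.Set.contains, PySem.Set.empty]

lemma fold_inv (words : List String) (d : PySem.Dict String (PySem.Set Int)) :
    words.foldl (fun e word =>
        let fc := pyFirstChar word
        e.insert fc (e.getD fc true && (PySem.Int.mod (PySem.Str.len word) 2 == 0))) (pvMap d)
      = pvMap (words.foldl (fun d word =>
        let fc := pyFirstChar word
        let d := if d.contains fc = false then d.insert fc PySem.Set.empty else d
        d.modify fc PySem.Set.empty (fun s => PySem.Set.add s (PySem.Str.len word))) d) := by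
  induction words generalizing d with
  | nil => rfl
  | cons w ws ih =>
      simp only [List.foldl_cons]
      rw [step_eq, ih]

lemma nodup_keys_foldA (words : List String) (d : PySem.Dict String (PySem.Set Int))
    (h : d.keys.Nodup) :
    (words.foldl (fun d word =>
        let fc := pyFirstChar word
        let d := if d.contains fc = false then d.insert fc PySem.Set.empty else d
        d.modify fc PySem.Set.empty (fun s => PySem.Set.add s (PySem.Str.len word))) d).keys.Nodup := by
  induction words generalizing d with
  | nil => exact h
  | cons w ws ih =>
      simp only [List.foldl_cons]
      apply ih
      apply PySem.Dict.nodup_keys_insert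
      by_cases hc : d.contains (pyFirstChar w) = false
      · rw [if_pos hc]
        exact PySem.Dict.nodup_keys_insert _ _ _ h
      · rw [if_neg hc]
        exact h

lemma second_pass (C : PySem.Dict String (PySem.Set Int)) (hnd : C.keys.Nodup) :
    C.keys.foldl (fun opt char =>
        if (C.getD char PySem.Set.empty).all (fun x => PySem.Int.mod x 2 == 0)
        then PySem.Set.add opt char else opt) PySem.Set.empty
      = (pvMap C).items.foldl (fun s kv => if kv.2 then PySem.Set.add s kv.1 else s)
          PySem.Set.empty := by
  have hitems : (pvMap C).items = C.keys.map (fun k => (k, pvVal (C.getD k PySem.Set.empty))) := by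
    show C.items.map _ = _
    rw [PySem.Dict.items_eq_map_keys C hnd PySem.Set.empty, List.map_map]
    rfl
  rw [hitems, List.foldl_map]
  rfl

-- ===== VERDICT (by name: the statement is the Claim_ definition above) =====
theorem get_optimal_chars_spec : Claim_equal_get_optimal_chars := by
  intro words _hdom _hpre
  unfold Spec_get_optimal_chars get_optimal_chars get_optimal_chars_alt
  rw [show (PySem.Dict.empty : PySem.Dict String Bool) = pvMap PySem.Dict.empty from rfl,
    fold_inv]
  exact second_pass _ (nodup_keys_foldA words _ (by simp [PySem.Dict.empty, PySem.Dict.keys]))
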